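-- pv_equiv track=rewrite | github.com/MrBrantCode/unitest_baseline | mut_generate/mist_train_taco/taco_9142/solution.py | find_min_xor_with_set_bits
-- ===== SOURCE A (Python) =====
-- def find_min_xor_with_set_bits(A: int, B: int) -> int:
--     # Convert A to binary string without the '0b' prefix
--     a_bin = bin(A)[2:]
--
--     # Count the number of set bits in B
--     count_b_set_bits = bin(B).count('1')
--
--     # Initialize a list to represent the binary string of X
--     x_bin = ['0' for _ in range(len(a_bin))]
--
--     # First pass: Set bits in X where A has bits to minimize XOR
--     for i in range(len(a_bin)):
--         if a_bin[i] == '1' and count_b_set_bits > 0: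
--             x_bin[i] = '1'
--             count_b_set_bits -= 1
--
--     # Second pass: Set remaining bits from the least significant bit
--     for i in range(len(x_bin) - 1, -1, -1):
--         if x_bin[i] == '0' and count_b_set_bits > 0:
--             x_bin[i] = '1'
--             count_b_set_bits -= 1
--
--     # If there are still set bits left to be added, append them to the most significant side
--     if count_b_set_bits > 0:
--         x_bin.reverse()
--         while count_b_set_bits:
--             x_bin.append('1')
--             count_b_set_bits -= 1
--         x_bin.reverse()
--
--     # Convert the binary string back to an integer
--     x_value = 0
--     for i in range(len(x_bin)):
--         if x_bin[i] == '1':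
--             x_value += 1 << (len(x_bin) - 1 - i)
--
--     return x_value
-- ===== SOURCE B (Python) =====
-- def _go(s, drop, add):
--     # s: bit chars LSB-first; skip the first `drop` '1'-chars, turn on the
--     # first `add` non-'1' chars, keep the rest as-is; return the value.
--     if not s:
--         return 0
--     c, rest = s[0], s[1:]
--     if c == '1':
--         if drop:
--             return 2 * _go(rest, drop - 1, add)
--         return 1 + 2 * _go(rest, 0, add)
--     if add:
--         return 1 + 2 * _go(rest, drop, add - 1)
--     return 2 * _go(rest, drop, add)
--
--
-- def find_min_xor_with_set_bits(A: int, B: int) -> int: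
--     a_bin = bin(A)[2:]
--     k = bin(B).count('1')
--     L = len(a_bin)
--     if k >= L:
--         # every position gets set and the k-L leftovers extend above the MSB
--         return (1 << k) - 1
--     m = a_bin.count('1')
--     drop = m - k if k < m else 0
--     add = k - m if m < k else 0
--     return _go(a_bin[::-1], drop, add)
-- ===== Notes on version B (the rewrite author's own statement) =====
-- stated objective: alternative
-- what changed: A fills a mutable char array in three staged passes (greedy MSB mark, reverse LSB fill, MSB extension) and then re-reads the array to build the number; B has no array or position list at all: it returns the closed form (1<<k)-1 when k >= len(a_bin), and otherwise makes one recursive LSB-first pass over the bit string with two counters (drop = lowest ones to clear, add = lowest zeros to set), accumulating the value arithmetically as 2*rec(+1).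
import Mathlib
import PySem

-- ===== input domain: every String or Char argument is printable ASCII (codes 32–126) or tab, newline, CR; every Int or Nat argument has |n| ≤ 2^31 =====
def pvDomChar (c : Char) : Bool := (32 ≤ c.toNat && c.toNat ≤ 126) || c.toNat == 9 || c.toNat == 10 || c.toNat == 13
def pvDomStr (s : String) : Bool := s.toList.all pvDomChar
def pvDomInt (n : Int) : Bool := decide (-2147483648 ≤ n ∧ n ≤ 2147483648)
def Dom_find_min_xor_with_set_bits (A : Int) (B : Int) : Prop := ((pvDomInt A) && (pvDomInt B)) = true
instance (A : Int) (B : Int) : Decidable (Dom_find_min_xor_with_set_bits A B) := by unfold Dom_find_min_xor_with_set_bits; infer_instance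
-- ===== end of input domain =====

-- B replaces A's three staged passes over a mutable char array by a closed form for the
-- overflow case and otherwise one recursive LSB-first pass with two counters (alternative).


-- ===== PORT A =====
-- first pass: set '1' where a_bin has '1' while bits remain (returns list and remaining count)
def pvPass1 : List Char → Nat → List Char × Nat
  | [], k => ([], k)
  | c :: rest, k =>
    if c = '1' ∧ 0 < k then
      let r := pvPass1 rest (k - 1); ('1' :: r.1, r.2)
    else
      let r := pvPass1 rest k; ('0' :: r.1, r.2)

-- second pass runs right-to-left over x_bin; we run it on the reversed list
def pvPass2 : List Char → Nat → List Char × Nat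
  | [], k => ([], k)
  | c :: rest, k =>
    if c = '0' ∧ 0 < k then
      let r := pvPass2 rest (k - 1); ('1' :: r.1, r.2)
    else
      let r := pvPass2 rest k; (c :: r.1, r.2)

-- final conversion loop: bit at index i weighs 2^(len-1-i) = 2^(length of its suffix)
def pvToVal : List Char → Int
  | [] => 0
  | c :: rest => (if c = '1' then (2:Int) ^ rest.length else 0) + pvToVal rest

def find_min_xor_with_set_bits (A : Int) (B : Int) : Int :=
  let a_bin := (PySem.Int.toBinChars0b A).drop 2
  let cnt := (PySem.Int.toBinChars0b B).count '1'
  let p1 := pvPass1 a_bin cnt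
  let p2 := pvPass2 p1.1.reverse p1.2
  let x2 := p2.1.reverse
  let x3 := if 0 < p2.2 then (x2.reverse ++ List.replicate p2.2 '1').reverse else x2
  pvToVal x3

-- ===== PORT B =====
-- _go: s is LSB-first; skip the first `drop` '1'-chars, turn on the first `add`
-- non-'1' chars, keep the rest; value accumulated arithmetically
def pvGo : List Char → Nat → Nat → Int
  | [], _, _ => 0
  | c :: rest, drop, add =>
    if c = '1' then
      if 0 < drop then 2 * pvGo rest (drop - 1) add
      else 1 + 2 * pvGo rest 0 add
    else if 0 < add then 1 + 2 * pvGo rest drop (add - 1)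
    else 2 * pvGo rest drop add

def find_min_xor_with_set_bits_alt (A : Int) (B : Int) : Int :=
  let a_bin := (PySem.Int.toBinChars0b A).drop 2
  let k := (PySem.Int.toBinChars0b B).count '1'
  let L := a_bin.length
  if L ≤ k then (2:Int) ^ k - 1
  else
    let m := a_bin.count '1'
    let drop := if k < m then m - k else 0
    let add := if m < k then k - m else 0
    pvGo a_bin.reverse drop add

-- ===== PRECONDITION & SPEC =====
def Spec_find_min_xor_with_set_bits (A : Int) (B : Int) (out : Int) : Prop := out = find_min_xor_with_set_bits_alt A B
instance (A : Int) (B : Int) (out : Int) : Decidable (Spec_find_min_xor_with_set_bits A B out) := by unfold Spec_find_min_xor_with_set_bits; infer_instance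

-- ===== CLAIM (what is proved, stated in full; the proofs are below) =====
def Claim_equal_find_min_xor_with_set_bits : Prop := ∀ (A : Int) (B : Int), Dom_find_min_xor_with_set_bits A B → Spec_find_min_xor_with_set_bits A B (find_min_xor_with_set_bits A B)

-- ===== LEMMAS AND PROOFS =====

-- proof-only helper: split the bit powers (suffix lengths) of a char list into the
-- '1'-positions (MSB-first) and the rest (MSB-first); used to characterise port A
def pvSplit : List Char → List Nat × List Nat
  | [] => ([], [])
  | c :: r =>
    let s := pvSplit r
    if c = '1' then (r.length :: s.1, s.2) else (s.1, r.length :: s.2)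

theorem pvPass1_length (xs : List Char) (k : Nat) : (pvPass1 xs k).1.length = xs.length := by
  induction xs generalizing k with
  | nil => rfl
  | cons c rest ih => simp only [pvPass1]; split <;> simp [ih]

theorem pvPass1_snd (xs : List Char) (k : Nat) : (pvPass1 xs k).2 = k - xs.count '1' := by
  induction xs generalizing k with
  | nil => simp [pvPass1]
  | cons c rest ih =>
    simp only [pvPass1]
    by_cases hc : c = '1'
    · by_cases hk : 0 < k
      · simp [hc, hk, ih, List.count_cons]; omega
      · simp [hc, hk, ih, List.count_cons]; omega
    · simp [hc, ih, List.count_cons, Ne.symm hc]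

theorem pvSplit_fst_length (xs : List Char) : (pvSplit xs).1.length = xs.count '1' := by
  induction xs with
  | nil => simp [pvSplit]
  | cons c r ih =>
    simp only [pvSplit]
    by_cases hc : c = '1'
    · simp [hc, ih, List.count_cons]
    · simp [hc, ih, List.count_cons, Ne.symm hc]

theorem pvSplit_snd_length (xs : List Char) : (pvSplit xs).2.length = xs.length - xs.count '1' := by
  induction xs with
  | nil => simp [pvSplit]
  | cons c r ih =>
    have hcount : r.count '1' ≤ r.length := List.count_le_length
    simp only [pvSplit]
    by_cases hc : c = '1'
    · simp [hc, ih]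
    · simp [hc, ih]; omega

theorem pvToVal_pass1 (xs : List Char) (k : Nat) :
    pvToVal (pvPass1 xs k).1 = (((pvSplit xs).1.take k).map (fun q => (2:Int) ^ q)).sum := by
  induction xs generalizing k with
  | nil => simp [pvPass1, pvSplit, pvToVal]
  | cons c rest ih =>
    simp only [pvPass1, pvSplit]
    by_cases hc : c = '1'
    · by_cases hk : 0 < k
      · obtain ⟨k', rfl⟩ : ∃ k', k = k' + 1 := ⟨k - 1, by omega⟩
        simp [hc, hk, pvToVal, ih, pvPass1_length]
      · have : k = 0 := by omega
        subst this
        simp [hc, pvToVal, ih]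
    · simp [hc, pvToVal, ih]

theorem pvPass1_full (xs : List Char) (k : Nat) (h : xs.count '1' ≤ k) :
    (pvPass1 xs k).1 = xs.map (fun c => if c = '1' then '1' else '0') := by
  induction xs generalizing k with
  | nil => rfl
  | cons c rest ih =>
    simp only [pvPass1, List.map]
    by_cases hc : c = '1'
    · have hk : 0 < k := by simp [hc] at h; omega
      simp [hc, hk]
      exact ih _ (by simp [hc] at h; omega)
    · simp [hc]
      exact ih _ (by simp [hc] at h; omega)

theorem pvPass2_zero (ys : List Char) : pvPass2 ys 0 = (ys, 0) := by
  induction ys with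
  | nil => rfl
  | cons c rest ih => simp [pvPass2, ih]

theorem pvPass2_length (ys : List Char) (m : Nat) : (pvPass2 ys m).1.length = ys.length := by
  induction ys generalizing m with
  | nil => rfl
  | cons c rest ih => simp only [pvPass2]; split <;> simp [ih]

-- value of a list read LSB-first (position j weighs 2^j)
def pvRVal : List Char → Int
  | [] => 0
  | c :: rest => (if c = '1' then 1 else 0) + 2 * pvRVal rest

theorem pvToVal_append (a b : List Char) :
    pvToVal (a ++ b) = pvToVal a * 2 ^ b.length + pvToVal b := by
  induction a with
  | nil => simp [pvToVal]
  | cons c rest ih =>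
    simp only [List.cons_append, pvToVal, ih, List.length_append, pow_add]
    split <;> ring

theorem pvToVal_reverse (ys : List Char) : pvToVal ys.reverse = pvRVal ys := by
  induction ys with
  | nil => rfl
  | cons c rest ih =>
    simp only [List.reverse_cons, pvToVal_append, ih, pvRVal, pvToVal]
    simp [pvToVal]; ring

-- increasing positions of the '0' chars
def pvZPos : List Char → List Nat
  | [] => []
  | c :: rest => if c = '0' then 0 :: (pvZPos rest).map (· + 1) else (pvZPos rest).map (· + 1)

theorem pvSum_pow_comp (l : List Nat) :
    (l.map ((fun q => (2:Int) ^ q) ∘ (· + 1))).sum = 2 * (l.map (fun q => (2:Int) ^ q)).sum := by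
  induction l with
  | nil => simp
  | cons x xs ih => simp [Function.comp, ih, pow_succ]; ring

theorem pvPass2_rval (ys : List Char) (m : Nat) :
    pvRVal (pvPass2 ys m).1
      = pvRVal ys + (((pvZPos ys).take m).map (fun q => (2:Int) ^ q)).sum := by
  induction ys generalizing m with
  | nil => simp [pvPass2, pvZPos, pvRVal]
  | cons c rest ih =>
    simp only [pvPass2, pvZPos]
    by_cases hc : c = '0'
    · by_cases hm : 0 < m
      · obtain ⟨m', rfl⟩ : ∃ m', m = m' + 1 := ⟨m - 1, by omega⟩
        rw [if_pos ⟨hc, hm⟩, if_pos hc, List.take_succ_cons, List.map_cons, List.sum_cons]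
        simp only [pvRVal, ih, hc]
        rw [show ((pvZPos rest).map (· + 1)).take m' = ((pvZPos rest).take m').map (· + 1) from
              (List.map_take ..).symm,
            List.map_map, pvSum_pow_comp]
        simp
        ring
      · have : m = 0 := by omega
        subst this
        rw [if_neg (fun h => hm h.2)]
        simp [pvPass2_zero]
    · rw [if_neg (fun h => hc h.1), if_neg hc]
      simp only [pvRVal, ih]
      rw [show ((pvZPos rest).map (· + 1)).take m = ((pvZPos rest).take m).map (· + 1) from
            (List.map_take ..).symm,
          List.map_map, pvSum_pow_comp]
      ring

theorem pvPass2_snd (ys : List Char) (m : Nat) :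
    (pvPass2 ys m).2 = m - ys.count '0' := by
  induction ys generalizing m with
  | nil => simp [pvPass2]
  | cons c rest ih =>
    simp only [pvPass2]
    by_cases hc : c = '0'
    · by_cases hm : 0 < m
      · simp [hc, hm, ih, List.count_cons]; omega
      · simp [hc, hm, ih, List.count_cons]; omega
    · simp [hc, ih, List.count_cons, Ne.symm hc]

-- '0' positions as suffix lengths (MSB-first order)
def pvZsfx : List Char → List Nat
  | [] => []
  | c :: rest => if c = '0' then rest.length :: pvZsfx rest else pvZsfx rest

theorem pvZPos_append_singleton (a : List Char) (c : Char) :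
    pvZPos (a ++ [c]) = pvZPos a ++ (if c = '0' then [a.length] else []) := by
  induction a with
  | nil => by_cases hc : c = '0' <;> simp [pvZPos, hc]
  | cons d rest ih =>
    simp only [List.cons_append, pvZPos, ih]
    by_cases hc : c = '0' <;> by_cases hd : d = '0' <;> simp [hc, hd]

theorem pvZPos_reverse (ys : List Char) : pvZPos ys.reverse = (pvZsfx ys).reverse := by
  induction ys with
  | nil => rfl
  | cons c rest ih =>
    simp only [List.reverse_cons, pvZPos_append_singleton, ih, pvZsfx]
    by_cases hc : c = '0' <;> simp [hc]

theorem pvZsfx_fullmark (xs : List Char) :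
    pvZsfx (xs.map (fun c => if c = '1' then '1' else '0')) = (pvSplit xs).2 := by
  induction xs with
  | nil => rfl
  | cons c rest ih =>
    simp only [List.map, pvZsfx, pvSplit]
    by_cases hc : c = '1' <;> simp [hc, ih]

theorem pvCount_zero_fullmark (xs : List Char) :
    (xs.map (fun c => if c = '1' then '1' else '0')).count '0' = xs.length - xs.count '1' := by
  induction xs with
  | nil => simp
  | cons c rest ih =>
    have hcount : rest.count '1' ≤ rest.length := List.count_le_length
    by_cases hc : c = '1'
    · simp [hc, ih]
    · simp [hc, ih]; omega

theorem pvToVal_replicate_one (m : Nat) : pvToVal (List.replicate m '1') = 2 ^ m - 1 := by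
  induction m with
  | zero => simp [pvToVal]
  | succ n ih => simp [List.replicate_succ, pvToVal, ih, pow_succ]; ring

theorem pvFoldl_range_pow (e L : Nat) (t : Int) :
    (List.range e).foldl (fun acc j => acc + (2:Int) ^ (L + j)) t
      = t + ((2:Int) ^ e - 1) * 2 ^ L := by
  induction e generalizing t with
  | zero => simp
  | succ n ih =>
    rw [List.range_succ, List.foldl_append, ih]
    simp [pow_add, pow_succ]
    ring

-- A's whole pipeline, abstracted over the parsed bit string and the count, equals the
-- priority-selection formula (first k of: one-powers MSB-first, other powers LSB-first, overflow)
theorem pvMain (xs : List Char) (k : Nat) :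
    (let p1 := pvPass1 xs k
     let p2 := pvPass2 p1.1.reverse p1.2
     let x2 := p2.1.reverse
     pvToVal (if 0 < p2.2 then (x2.reverse ++ List.replicate p2.2 '1').reverse else x2))
    = (let s := pvSplit xs
       let sel := (s.1 ++ s.2.reverse).take k
       (List.range (k - sel.length)).foldl (fun acc j => acc + (2:Int) ^ (xs.length + j))
         ((sel.map (fun q => (2:Int) ^ q)).sum)) := by
  show pvToVal (if 0 < (pvPass2 (pvPass1 xs k).1.reverse (pvPass1 xs k).2).2 then
        ((pvPass2 (pvPass1 xs k).1.reverse (pvPass1 xs k).2).1.reverse.reverse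
          ++ List.replicate (pvPass2 (pvPass1 xs k).1.reverse (pvPass1 xs k).2).2 '1').reverse
      else (pvPass2 (pvPass1 xs k).1.reverse (pvPass1 xs k).2).1.reverse)
    = (List.range (k - (((pvSplit xs).1 ++ (pvSplit xs).2.reverse).take k).length)).foldl
        (fun acc j => acc + (2:Int) ^ (xs.length + j))
        (((((pvSplit xs).1 ++ (pvSplit xs).2.reverse).take k).map (fun q => (2:Int) ^ q)).sum)
  have hcnt : xs.count '1' ≤ xs.length := List.count_le_length
  have holen : (pvSplit xs).1.length = xs.count '1' := pvSplit_fst_length xs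
  have hzlen : (pvSplit xs).2.length = xs.length - xs.count '1' := pvSplit_snd_length xs
  have hp1snd : (pvPass1 xs k).2 = k - xs.count '1' := pvPass1_snd xs k
  by_cases hk : k ≤ xs.count '1'
  · -- pass1 exhausts the budget; pass2 and the overflow branch are no-ops
    have h0 : (pvPass1 xs k).2 = 0 := by rw [hp1snd]; omega
    rw [h0, pvPass2_zero]
    simp only [List.reverse_reverse, lt_self_iff_false, if_false]
    rw [pvToVal_pass1, List.take_append_of_le_length (by omega)]
    have hlt : (((pvSplit xs).1.take k)).length = k := by simp [List.length_take]; omega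
    rw [hlt, Nat.sub_self]
    simp
  · push_neg at hk
    have hfull : (pvPass1 xs k).1 = xs.map (fun c => if c = '1' then '1' else '0') :=
      pvPass1_full xs k (le_of_lt hk)
    have hx1len : (pvPass1 xs k).1.length = xs.length := pvPass1_length xs k
    have hy0 : (pvPass1 xs k).1.reverse.count '0' = xs.length - xs.count '1' := by
      rw [List.count_reverse, hfull, pvCount_zero_fullmark]
    have hsnd : (pvPass2 (pvPass1 xs k).1.reverse (pvPass1 xs k).2).2 = k - xs.length := by
      rw [pvPass2_snd, hy0, hp1snd]; omega
    have hzpos : pvZPos (pvPass1 xs k).1.reverse = (pvSplit xs).2.reverse := by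
      rw [pvZPos_reverse, hfull, pvZsfx_fullmark]
    have hrval : pvRVal (pvPass1 xs k).1.reverse = ((pvSplit xs).1.map (fun q => (2:Int) ^ q)).sum := by
      rw [← pvToVal_reverse, List.reverse_reverse, pvToVal_pass1, List.take_of_length_le (by omega)]
    have hx2 : pvToVal (pvPass2 (pvPass1 xs k).1.reverse (pvPass1 xs k).2).1.reverse
        = ((pvSplit xs).1.map (fun q => (2:Int) ^ q)).sum
          + (((pvSplit xs).2.reverse.take (k - xs.count '1')).map (fun q => (2:Int) ^ q)).sum := by
      rw [pvToVal_reverse, pvPass2_rval, hzpos, hrval, hp1snd]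
    have hsel : ((pvSplit xs).1 ++ (pvSplit xs).2.reverse).take k
        = (pvSplit xs).1 ++ (pvSplit xs).2.reverse.take (k - xs.count '1') := by
      rw [List.take_append, List.take_of_length_le (by omega), holen]
    by_cases hkL : k ≤ xs.length
    · -- no overflow
      have h20 : (pvPass2 (pvPass1 xs k).1.reverse (pvPass1 xs k).2).2 = 0 := by
        rw [hsnd]; omega
      rw [h20]
      simp only [lt_self_iff_false, if_false]
      rw [hx2, hsel]
      have hsellen : ((pvSplit xs).1 ++ (pvSplit xs).2.reverse.take (k - xs.count '1')).length = k := by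
        simp [List.length_take]; omega
      rw [hsellen, Nat.sub_self]
      simp [List.map_append]
    · -- overflow: extra bits go above the MSB
      push_neg at hkL
      have h2pos : 0 < (pvPass2 (pvPass1 xs k).1.reverse (pvPass1 xs k).2).2 := by
        rw [hsnd]; omega
      rw [if_pos h2pos, List.reverse_append, List.reverse_reverse, List.reverse_replicate,
        pvToVal_append, pvToVal_replicate_one, hsnd]
      have hx2len : (pvPass2 (pvPass1 xs k).1.reverse (pvPass1 xs k).2).1.reverse.length = xs.length := by
        rw [List.length_reverse, pvPass2_length, List.length_reverse, hx1len]
      rw [hx2len, hx2,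
        List.take_of_length_le (by simp; omega : (pvSplit xs).2.reverse.length ≤ k - xs.count '1'),
        List.take_of_length_le (by simp; omega : ((pvSplit xs).1 ++ (pvSplit xs).2.reverse).length ≤ k)]
      have hlen : ((pvSplit xs).1 ++ (pvSplit xs).2.reverse).length = xs.length := by simp; omega
      rw [hlen, pvFoldl_range_pow]
      simp [List.map_append]
      ring

-- pvSplit of a list extended at the LSB end
theorem pvSplit_append_singleton (ts : List Char) (c : Char) :
    pvSplit (ts ++ [c])
      = ((pvSplit ts).1.map (· + 1) ++ (if c = '1' then [0] else []),
         (pvSplit ts).2.map (· + 1) ++ (if c = '1' then [] else [0])) := by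
  induction ts with
  | nil => by_cases hc : c = '1' <;> simp [pvSplit, hc]
  | cons d rest ih =>
    simp only [List.cons_append, pvSplit, ih]
    by_cases hd : d = '1' <;> simp [hd, List.length_append]

-- the priority-selection sum (no overflow) equals B's single LSB-first pass
theorem pvFG (ys : List Char) (k : Nat) (hk : k ≤ ys.length) :
    ((((pvSplit ys).1 ++ (pvSplit ys).2.reverse).take k).map (fun q => (2:Int) ^ q)).sum
      = pvGo ys.reverse (ys.count '1' - k) (k - ys.count '1') := by
  induction ys using List.reverseRecOn generalizing k with
  | nil =>
    have hk0 : k = 0 := by simpa using hk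
    subst hk0
    simp [pvSplit, pvGo]
  | append_singleton ts c ih =>
    have hm : (pvSplit ts).1.length = ts.count '1' := pvSplit_fst_length ts
    have hmlen : ts.count '1' ≤ ts.length := List.count_le_length
    have hklen : k ≤ ts.length + 1 := by simpa using hk
    have hrev : (ts ++ [c]).reverse = c :: ts.reverse := by simp
    by_cases hc : c = '1'
    · have hcnt : List.count '1' (ts ++ [c]) = ts.count '1' + 1 := by simp [hc]
      rw [pvSplit_append_singleton, hrev, hcnt]
      simp only [if_pos hc, List.append_nil]
      by_cases hlt : k ≤ ts.count '1'
      · -- drop > 0: the new LSB one is skipped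
        have ihk := ih k (by omega)
        rw [List.take_append_of_le_length (by simp [hm]; omega),
            List.take_append_of_le_length (by simp [hm]; omega),
            ← List.map_take, List.map_map, pvSum_pow_comp,
            show ts.count '1' + 1 - k = (ts.count '1' - k) + 1 from by omega,
            show k - (ts.count '1' + 1) = k - ts.count '1' from by omega,
            hc]
        rw [show pvGo ('1' :: ts.reverse) ((ts.count '1' - k) + 1) (k - ts.count '1')
              = 2 * pvGo ts.reverse (ts.count '1' - k) (k - ts.count '1') from by
            simp [pvGo]]
        rw [← ihk, List.take_append_of_le_length (by rw [hm]; omega)]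
      · -- drop = 0: the new LSB one is kept
        push_neg at hlt
        have ihk := ih (k - 1) (by omega)
        rw [show ts.count '1' - (k - 1) = 0 from by omega] at ihk
        rw [show ((pvSplit ts).1.map (· + 1) ++ [0]) ++ ((pvSplit ts).2.map (· + 1)).reverse
              = (pvSplit ts).1.map (· + 1) ++ (0 :: ((pvSplit ts).2.map (· + 1)).reverse) from by
            simp]
        rw [List.take_append,
            List.take_of_length_le (by rw [List.length_map, hm]; omega),
            List.length_map, hm,
            show k - ts.count '1' = (k - 1 - ts.count '1') + 1 from by omega,
            List.take_succ_cons, List.map_append, List.sum_append, List.map_cons, List.sum_cons,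
            ← List.map_reverse, ← List.map_take, List.map_map, List.map_map,
            pvSum_pow_comp, pvSum_pow_comp,
            show ts.count '1' + 1 - k = 0 from by omega,
            show k - (ts.count '1' + 1) = (k - 1) - ts.count '1' from by omega,
            hc]
        rw [show pvGo ('1' :: ts.reverse) 0 ((k - 1) - ts.count '1')
              = 1 + 2 * pvGo ts.reverse 0 ((k - 1) - ts.count '1') from by
            simp [pvGo]]
        rw [← ihk,
            show ((pvSplit ts).1 ++ (pvSplit ts).2.reverse).take (k - 1)
              = (pvSplit ts).1 ++ (pvSplit ts).2.reverse.take (k - 1 - ts.count '1') from by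
              rw [List.take_append, List.take_of_length_le (by rw [hm]; omega), hm],
            List.map_append, List.sum_append]
        simp only [pow_zero]
        ring
    · have hcnt : List.count '1' (ts ++ [c]) = ts.count '1' := by simp [hc]
      rw [pvSplit_append_singleton, hrev, hcnt]
      simp only [if_neg hc, List.append_nil, List.reverse_append, List.reverse_singleton,
        List.singleton_append]
      by_cases hlt : k ≤ ts.count '1'
      · -- add = 0 here; the new LSB zero stays off
        have ihk := ih k (by omega)
        rw [show k - ts.count '1' = 0 from by omega] at ihk ⊢
        rw [List.take_append_of_le_length (by simp [hm]; omega),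
            ← List.map_take, List.map_map, pvSum_pow_comp]
        rw [show pvGo (c :: ts.reverse) (ts.count '1' - k) 0
              = 2 * pvGo ts.reverse (ts.count '1' - k) 0 from by
            simp [pvGo, hc]]
        rw [← ihk, List.take_append_of_le_length (by rw [hm]; omega)]
      · -- add > 0: the new LSB zero is turned on
        push_neg at hlt
        have ihk := ih (k - 1) (by omega)
        rw [show ts.count '1' - (k - 1) = ts.count '1' - k from by omega] at ihk
        rw [List.take_append,
            List.take_of_length_le (by rw [List.length_map, hm]; omega),
            List.length_map, hm,
            show k - ts.count '1' = (k - 1 - ts.count '1') + 1 from by omega,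
            List.take_succ_cons, List.map_append, List.sum_append, List.map_cons, List.sum_cons,
            ← List.map_reverse, ← List.map_take, List.map_map, List.map_map,
            pvSum_pow_comp, pvSum_pow_comp]
        rw [show (k - 1 - ts.count '1') + 1 = k - ts.count '1' from by omega]
        rw [show pvGo (c :: ts.reverse) (ts.count '1' - k) (k - ts.count '1')
              = 1 + 2 * pvGo ts.reverse (ts.count '1' - k) ((k - 1) - ts.count '1') from by
            rw [show k - ts.count '1' = ((k - 1) - ts.count '1') + 1 from by omega]
            simp [pvGo, hc]]
        rw [← ihk,
            show ((pvSplit ts).1 ++ (pvSplit ts).2.reverse).take (k - 1)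
              = (pvSplit ts).1 ++ (pvSplit ts).2.reverse.take (k - 1 - ts.count '1') from by
              rw [List.take_append, List.take_of_length_le (by rw [hm]; omega), hm],
            List.map_append, List.sum_append]
        simp only [pow_zero]
        ring

-- all bit powers together sum to 2^len - 1 (used in the overflow branch)
theorem pvFullSum (xs : List Char) :
    (((pvSplit xs).1 ++ (pvSplit xs).2.reverse).map (fun q => (2:Int) ^ q)).sum
      = 2 ^ xs.length - 1 := by
  induction xs with
  | nil => simp [pvSplit]
  | cons c r ih =>
    have ih' : ((pvSplit r).1.map (fun q => (2:Int) ^ q)).sum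
        + ((pvSplit r).2.map (fun q => (2:Int) ^ q)).sum = 2 ^ r.length - 1 := by
      simpa [List.sum_append, List.map_reverse, List.sum_reverse] using ih
    by_cases hc : c = '1' <;>
      simp only [pvSplit, hc, if_true, if_false, reduceIte, List.map_append,
        List.sum_append, List.map_cons, List.sum_cons, List.map_reverse, List.sum_reverse,
        List.length_cons, pow_succ] <;>
      linarith [ih']

-- the selection formula equals B's body, for any parsed char list and count
theorem pvMainB (xs : List Char) (k : Nat) :
    (let s := pvSplit xs
     let sel := (s.1 ++ s.2.reverse).take k
     (List.range (k - sel.length)).foldl (fun acc j => acc + (2:Int) ^ (xs.length + j))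
       ((sel.map (fun q => (2:Int) ^ q)).sum))
    = (if xs.length ≤ k then (2:Int) ^ k - 1
       else pvGo xs.reverse (if k < xs.count '1' then xs.count '1' - k else 0)
              (if xs.count '1' < k then k - xs.count '1' else 0)) := by
  show (List.range (k - (((pvSplit xs).1 ++ (pvSplit xs).2.reverse).take k).length)).foldl
        (fun acc j => acc + (2:Int) ^ (xs.length + j))
        (((((pvSplit xs).1 ++ (pvSplit xs).2.reverse).take k).map (fun q => (2:Int) ^ q)).sum)
      = (if xs.length ≤ k then (2:Int) ^ k - 1
         else pvGo xs.reverse (if k < xs.count '1' then xs.count '1' - k else 0)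
                (if xs.count '1' < k then k - xs.count '1' else 0))
  have hm : (pvSplit xs).1.length = xs.count '1' := pvSplit_fst_length xs
  have hz : (pvSplit xs).2.length = xs.length - xs.count '1' := pvSplit_snd_length xs
  have hcnt : xs.count '1' ≤ xs.length := List.count_le_length
  have hflen : ((pvSplit xs).1 ++ (pvSplit xs).2.reverse).length = xs.length := by
    simp [hm, hz]; omega
  by_cases hk : xs.length ≤ k
  · rw [if_pos hk, List.take_of_length_le (by omega), hflen, pvFullSum, pvFoldl_range_pow]
    have h2 : (2:Int) ^ (k - xs.length) * 2 ^ xs.length = 2 ^ k := by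
      rw [← pow_add]; congr 1; omega
    nlinarith [h2]
  · rw [if_neg hk]
    push_neg at hk
    have hsel : (((pvSplit xs).1 ++ (pvSplit xs).2.reverse).take k).length = k := by
      rw [List.length_take, hflen]; omega
    rw [hsel, Nat.sub_self, List.range_zero, List.foldl_nil]
    rw [show (if k < xs.count '1' then xs.count '1' - k else 0) = xs.count '1' - k from by
          split_ifs <;> omega,
        show (if xs.count '1' < k then k - xs.count '1' else 0) = k - xs.count '1' from by
          split_ifs <;> omega]
    exact pvFG xs k (by omega)

-- ===== VERDICT (by name: the statement is the Claim_ definition above) =====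
theorem find_min_xor_with_set_bits_spec : Claim_equal_find_min_xor_with_set_bits := by
  intro A B _
  show find_min_xor_with_set_bits A B = find_min_xor_with_set_bits_alt A B
  exact (pvMain _ _).trans (pvMainB _ _)
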